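-- pv_equiv track=rewrite | github.com/aashirnay54/AINewsScraper | briefing/template.py | _render_ai_sections
-- ===== SOURCE A (Python) =====
-- from typing import Any
--
-- GRAY = "#666666"
--
-- DARK = "#1a1a1a"
--
-- def _render_ai_sections(articles: list[dict[str, Any]]) -> str:
--     if not articles:
--         return ""
--
--     # Group articles
--     groups: dict[str, list[dict[str, Any]]] = {}
--     for article in articles:
--         group = article.get("group", "Industry")
--         if group not in groups:
--             groups[group] = []
--         groups[group].append(article)
--
--     html_parts = []
--
--     # Define group order
--     group_order = ["Models & releases", "Research", "Tools & infra", "Industry"]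
--
--     for group_name in group_order:
--         if group_name not in groups:
--             continue
--
--         html_parts.append(f"""
--         <tr>
--             <td style="padding: 20px 24px 8px 24px;">
--                 <h3 style="margin: 0; font-size: 14px; text-transform: uppercase; color: {GRAY}; letter-spacing: 0.5px;">{group_name}</h3>
--             </td>
--         </tr>""")
--
--         for article in groups[group_name]:
--             title = article.get("title", "")
--             url = article.get("url", "#")
--             source = article.get("source", "")
--             summary = article.get("llm_summary", "")
--
--             html_parts.append(f"""
--         <tr>
--             <td style="padding: 8px 24px;">
--                 <p style="margin: 0 0 4px 0; font-size: 15px;">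
--                     <a href="{url}" style="color: {DARK}; text-decoration: none;">{title}</a>
--                 </p>
--                 {f'<p style="margin: 0 0 4px 0; font-size: 13px; color: {GRAY}; line-height: 1.4;">{summary}</p>' if summary else ''}
--                 <p style="margin: 0; font-size: 11px; color: {GRAY};">{source}</p>
--             </td>
--         </tr>""")
--
--     return "\n".join(html_parts)
-- ===== SOURCE B (Python) =====
-- from typing import Any
--
-- GRAY = "#666666"
--
-- DARK = "#1a1a1a"
--
--
-- def _render_ai_sections(articles: list[dict[str, Any]]) -> str:
--     if not articles:
--         return ""
--
--     html_parts = []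
--
--     for group_name in ["Models & releases", "Research", "Tools & infra", "Industry"]:
--         matching = [a for a in articles if a.get("group", "Industry") == group_name]
--         if not matching:
--             continue
--
--         html_parts.append(f"""
--         <tr>
--             <td style="padding: 20px 24px 8px 24px;">
--                 <h3 style="margin: 0; font-size: 14px; text-transform: uppercase; color: {GRAY}; letter-spacing: 0.5px;">{group_name}</h3>
--             </td>
--         </tr>""")
--
--         html_parts += [
--             f"""
--         <tr>
--             <td style="padding: 8px 24px;">
--                 <p style="margin: 0 0 4px 0; font-size: 15px;">
--                     <a href="{article.get("url", "#")}" style="color: {DARK}; text-decoration: none;">{article.get("title", "")}</a>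
--                 </p>
--                 {f'<p style="margin: 0 0 4px 0; font-size: 13px; color: {GRAY}; line-height: 1.4;">{article.get("llm_summary", "")}</p>' if article.get("llm_summary", "") else ''}
--                 <p style="margin: 0; font-size: 11px; color: {GRAY};">{article.get("source", "")}</p>
--             </td>
--         </tr>"""
--             for article in matching
--         ]
--
--     return "\n".join(html_parts)
-- ===== Notes on version B (the rewrite author's own statement) =====
-- stated objective: simpler
-- what changed: B drops A's grouping dictionary entirely: it iterates the fixed group order and filters the article list per group with a comprehension, emitting header and article blocks directly.
import Mathlib
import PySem

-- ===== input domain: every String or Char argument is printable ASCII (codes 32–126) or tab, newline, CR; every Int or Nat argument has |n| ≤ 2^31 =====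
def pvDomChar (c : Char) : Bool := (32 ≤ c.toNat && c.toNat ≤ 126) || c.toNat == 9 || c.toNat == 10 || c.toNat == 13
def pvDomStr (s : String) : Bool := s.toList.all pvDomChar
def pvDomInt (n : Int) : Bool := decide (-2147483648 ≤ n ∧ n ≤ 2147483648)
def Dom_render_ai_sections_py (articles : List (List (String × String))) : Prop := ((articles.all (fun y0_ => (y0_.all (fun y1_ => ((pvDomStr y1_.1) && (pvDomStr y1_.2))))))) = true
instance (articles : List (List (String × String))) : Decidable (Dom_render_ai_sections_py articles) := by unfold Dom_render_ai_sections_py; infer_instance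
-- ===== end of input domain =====

-- B drops A's grouping dictionary and instead filters the article list once per group name: simpler, same output.

-- ===== PORT A =====
-- article.get(k, dflt): the Python dict built from the association list, looked up with a default
def pvAget (a : List (String × String)) (k dflt : String) : String :=
  (PySem.Dict.ofList a).getD k dflt

-- the group-header f-string
def pvHeader (g : String) : String :=
  "\n        <tr>\n            <td style=\"padding: 20px 24px 8px 24px;\">\n                <h3 style=\"margin: 0; font-size: 14px; text-transform: uppercase; color: #666666; letter-spacing: 0.5px;\">" ++ g ++ "</h3>\n            </td>\n        </tr>"

-- the per-article f-string (identical in A and B)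
def pvArticle (a : List (String × String)) : String :=
  let title := pvAget a "title" ""
  let url := pvAget a "url" "#"
  let source := pvAget a "source" ""
  let summary := pvAget a "llm_summary" ""
  "\n        <tr>\n            <td style=\"padding: 8px 24px;\">\n                <p style=\"margin: 0 0 4px 0; font-size: 15px;\">\n                    <a href=\"" ++ url ++ "\" style=\"color: #1a1a1a; text-decoration: none;\">" ++ title ++ "</a>\n                </p>\n                " ++ (if summary == "" then "" else "<p style=\"margin: 0 0 4px 0; font-size: 13px; color: #666666; line-height: 1.4;\">" ++ summary ++ "</p>") ++ "\n                <p style=\"margin: 0; font-size: 11px; color: #666666;\">" ++ source ++ "</p>\n            </td>\n        </tr>"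

def pvGroupOrder : List String := ["Models & releases", "Research", "Tools & infra", "Industry"]

def render_ai_sections_py (articles : List (List (String × String))) : String :=
  if articles.isEmpty then "" else
  -- Group articles
  let groups : PySem.Dict String (List (List (String × String))) :=
    articles.foldl (fun groups article =>
      let g := pvAget article "group" "Industry"
      -- if group not in groups: groups[group] = []
      let groups := if groups.contains g then groups else groups.insert g []
      -- groups[group].append(article)
      groups.insert g (groups.getD g [] ++ [article])) PySem.Dict.empty
  let html_parts : List String :=
    pvGroupOrder.foldl (fun parts g =>
      if !groups.contains g then parts    -- continue
      else
        (groups.getD g []).foldl (fun parts article => parts ++ [pvArticle article])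
          (parts ++ [pvHeader g])) []
  PySem.Str.join "\n" html_parts

-- ===== PORT B =====
def render_ai_sections_py_alt (articles : List (List (String × String))) : String :=
  if articles.isEmpty then "" else
  let html_parts : List String :=
    pvGroupOrder.foldl (fun parts g =>
      let matching := articles.filter (fun a => pvAget a "group" "Industry" == g)
      if matching.isEmpty then parts   -- continue
      else (parts ++ [pvHeader g]) ++ matching.map pvArticle) []
  PySem.Str.join "\n" html_parts

-- ===== PRECONDITION & SPEC =====
def Spec_render_ai_sections_py (articles : List (List (String × String))) (out : String) : Prop := out = render_ai_sections_py_alt articles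
instance (articles : List (List (String × String))) (out : String) : Decidable (Spec_render_ai_sections_py articles out) := by unfold Spec_render_ai_sections_py; infer_instance

-- ===== CLAIM (what is proved, stated in full; the proofs are below) =====
def Claim_equal_render_ai_sections_py : Prop := ∀ (articles : List (List (String × String))), Dom_render_ai_sections_py articles → Spec_render_ai_sections_py articles (render_ai_sections_py articles)

-- ===== LEMMAS AND PROOFS =====

-- A's grouping step is Dict.modify
theorem pv_stepA_eq_modify (d : PySem.Dict String (List (List (String × String))))
    (a : List (String × String)) :
    (let g := pvAget a "group" "Industry"
     let d' := if d.contains g then d else d.insert g []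
     d'.insert g (d'.getD g [] ++ [a]))
      = d.modify (pvAget a "group" "Industry") [] (· ++ [a]) := by
  set g := pvAget a "group" "Industry" with hg
  by_cases h : d.contains g = true
  · simp [h, PySem.Dict.modify]
  · simp only [h, if_false, Bool.false_eq_true]
    rw [PySem.Dict.getD_insert_self, PySem.Dict.insert_insert_self, PySem.Dict.modify,
      PySem.Dict.getD_of_not_contains (h := by simpa using h)]

-- A's groups dict, characterised: lookup returns the filtered sublist
theorem pv_groups_getD (articles : List (List (String × String))) (g : String) :
    ((articles.foldl (fun d a => d.modify (pvAget a "group" "Industry") [] (· ++ [a]))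
        PySem.Dict.empty).getD g [])
      = articles.filter (fun a => pvAget a "group" "Industry" == g) := by
  have h := PySem.Dict.getD_foldl_modify_append
    (l := articles.map (fun a => (pvAget a "group" "Industry", a)))
    (d := (PySem.Dict.empty : PySem.Dict String (List (List (String × String))))) (c := g)
  rw [List.foldl_map] at h
  simpa [List.filter_map, Function.comp_def] using h

-- membership of a group name in A's groups dict
theorem pv_groups_contains (articles : List (List (String × String))) (g : String) :
    ((articles.foldl (fun d a => d.modify (pvAget a "group" "Industry") [] (· ++ [a]))
        PySem.Dict.empty).contains g)
      = !(articles.filter (fun a => pvAget a "group" "Industry" == g)).isEmpty := by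
  have hk := PySem.Dict.keys_foldl_modify_key (l := articles)
    (key := fun a => pvAget a "group" "Industry") (d0 := ([] : List (List (String × String))))
    (f := fun _ a => (· ++ [a]))
    (d := (PySem.Dict.empty : PySem.Dict String (List (List (String × String)))))
  rw [PySem.Dict.contains_eq_decide_mem_keys, hk]
  by_cases he : (articles.filter (fun a => pvAget a "group" "Industry" == g)) = []
  · have hb : (articles.filter (fun a => pvAget a "group" "Industry" == g)).isEmpty = true := by
      simp [he]
    rw [hb]
    simp only [Bool.not_true, decide_eq_false_iff_not, PySem.Set.mem_update, List.mem_map,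
      PySem.Dict.keys_empty, List.not_mem_nil, false_or]
    rintro ⟨a, ha, rfl⟩
    exact (List.filter_eq_nil_iff.mp he) a ha (by simp)
  · have hb : (articles.filter (fun a => pvAget a "group" "Industry" == g)).isEmpty = false := by
      simpa [List.isEmpty_iff] using he
    rw [hb]
    obtain ⟨a, ha⟩ := List.exists_mem_of_ne_nil _ he
    obtain ⟨ha1, ha2⟩ := List.mem_filter.mp ha
    simp only [Bool.not_false, decide_eq_true_iff, PySem.Set.mem_update, List.mem_map]
    exact Or.inr ⟨a, ha1, by simpa using ha2⟩

-- appending one rendered article at a time is append of the map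
theorem pv_foldl_append_map (l : List (List (String × String))) (p : List String) :
    l.foldl (fun parts a => parts ++ [pvArticle a]) p = p ++ l.map pvArticle := by
  induction l generalizing p with
  | nil => simp
  | cons a t ih => simp [List.foldl_cons, ih]

-- ===== VERDICT (by name: the statement is the Claim_ definition above) =====
theorem render_ai_sections_py_spec : Claim_equal_render_ai_sections_py := by
  intro articles _
  unfold Spec_render_ai_sections_py render_ai_sections_py render_ai_sections_py_alt
  by_cases h0 : articles.isEmpty
  · simp [h0]
  · simp only [h0]
    have hfold : articles.foldl (fun groups article =>
        let g := pvAget article "group" "Industry"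
        let groups := if groups.contains g then groups else groups.insert g []
        groups.insert g (groups.getD g [] ++ [article])) PySem.Dict.empty
        = articles.foldl (fun d a => d.modify (pvAget a "group" "Industry") [] (· ++ [a]))
            PySem.Dict.empty := by
      apply PySem.List.foldl_congr_mem
      intro acc a _
      exact pv_stepA_eq_modify acc a
    rw [hfold]
    refine congrArg (PySem.Str.join "\n") ?_
    apply PySem.List.foldl_congr_mem
    intro parts g _
    rw [pv_groups_contains, pv_groups_getD]
    by_cases he : (articles.filter (fun a => pvAget a "group" "Industry" == g)).isEmpty = true
    · simp [he]
    · have he' : (articles.filter (fun a => pvAget a "group" "Industry" == g)).isEmpty = false := by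
        simpa using he
      rw [he']
      simp only [Bool.not_false, Bool.not_true, Bool.false_eq_true, if_false]
      exact pv_foldl_append_map _ _
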